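-- pv_equiv track=rewrite | github.com/Ysh096/baekjoon | 삼성SW역량테스트기출/20056_마법사상어와파이어볼/s1.py | divide_balls
-- ===== SOURCE A (Python) =====
-- def divide_balls(new_balls):
--     # new_balls에서 위치가 같은 것 표시하기
--     new_dict = {}
--     for idx, ball in enumerate(new_balls):
--         r, c = ball[0], ball[1]
--         if new_dict.get((r, c)):
--             new_dict[(r, c)].append(idx)
--         else:
--             new_dict[(r, c)] = [idx]
--     # new_dict에는 파이어볼의 idx가 담겨있다. 겹치면 겹치는 만큼 담겨있음!
--     divided = []
--     for key, val in new_dict.items():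
--         if len(val) == 1:
--             divided.append(new_balls[val[0]])
--         else:
--             # 파이어볼이 겹치는 경우
--             nr, nc, m, s = key[0], key[1], 0, 0
--             dd = new_balls[val[0]][-1] % 2
--             flag = True
--             for i in val: # 각 인덱스별 값을 다 더해준다.
--                 m += new_balls[i][2]
--                 s += new_balls[i][3]
--                 d = new_balls[i][-1]
--                 if d % 2 != dd:
--                     flag = False
--             m = m // 5
--             s = s // len(val)
--             if m == 0:
--                 continue
--             if flag:
--                 for j in range(0, 8, 2):
--                     divided.append([nr, nc, m, s, j])
--             else:
--                 for j in range(1, 9, 2):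
--                     divided.append([nr, nc, m, s, j])
--     return divided
-- ===== SOURCE B (Python) =====
-- def divide_balls(new_balls):
--     # Single aggregation pass: group by position, accumulating running sums,
--     # a count and a parity flag instead of storing index lists.
--     groups = {}
--     for ball in new_balls:
--         key = (ball[0], ball[1])
--         g = groups.get(key)
--         if g is None:
--             groups[key] = (ball, 0, 0, 0, True)
--         else:
--             first, extra, m, s, same = g
--             groups[key] = (first, extra + 1, m + ball[2], s + ball[3],
--                            same and ball[-1] % 2 == first[-1] % 2)
--     result = []
--     for (r, c), (first, extra, m, s, same) in groups.items():
--         if extra == 0: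
--             result.append(first)
--             continue
--         m = (m + first[2]) // 5
--         s = (s + first[3]) // (extra + 1)
--         if m == 0:
--             continue
--         start = 0 if same else 1
--         for j in range(start, start + 8, 2):
--             result.append([r, c, m, s, j])
--     return result
-- ===== Notes on version B (the rewrite author's own statement) =====
-- stated objective: alternative
-- what changed: A groups fireballs into a dict of index lists and then re-scans new_balls per group with an inner loop to total mass/speed and check direction parity; B keeps a single order-preserving dict of running aggregates (first ball, count, mass sum, speed sum, parity flag) updated in one pass, so the per-group inner dereferencing loop disappears.
import Mathlib
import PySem

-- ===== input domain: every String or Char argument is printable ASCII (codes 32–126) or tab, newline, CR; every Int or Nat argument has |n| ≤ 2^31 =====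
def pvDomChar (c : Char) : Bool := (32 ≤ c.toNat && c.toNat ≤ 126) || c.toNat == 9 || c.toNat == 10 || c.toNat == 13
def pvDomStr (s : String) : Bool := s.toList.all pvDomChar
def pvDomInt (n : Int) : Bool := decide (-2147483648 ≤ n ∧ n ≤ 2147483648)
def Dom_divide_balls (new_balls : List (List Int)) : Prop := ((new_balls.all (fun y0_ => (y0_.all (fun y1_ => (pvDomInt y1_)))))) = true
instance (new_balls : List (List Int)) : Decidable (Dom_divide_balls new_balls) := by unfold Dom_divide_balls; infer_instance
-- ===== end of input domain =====

-- B replaces A's index-list grouping (dict of index lists + a second dereferencing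
-- scan per group) by a single aggregation pass keeping running mass/speed sums, a
-- count and a parity flag per position (objective: alternative decomposition).

-- ===== PORT A =====
-- A's pass-1 loop body: group ball indices by position (r, c).
-- Python tests `if new_dict.get((r,c)):` (truthiness); stored lists are always
-- non-empty, so matching some/none is exact on every reachable state.
def aInsert (d : PySem.Dict (Int × Int) (List Int)) (p : Int × List Int) :
    PySem.Dict (Int × Int) (List Int) :=
  let r := PySem.List.pyGetD p.2 0 0
  let c := PySem.List.pyGetD p.2 1 0
  match d.get? (r, c) with
  | some l => d.insert (r, c) (l ++ [p.1])
  | none   => d.insert (r, c) [p.1]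

-- A's inner per-group loop body: accumulate (m, s, flag) over the index list.
def aAccStep (new_balls : List (List Int)) (dd : Int) (acc : Int × Int × Bool) (i : Int) :
    Int × Int × Bool :=
  let ball := PySem.List.pyGetD new_balls i []
  let d := PySem.List.pyGetD ball (-1) 0
  (acc.1 + PySem.List.pyGetD ball 2 0,
   acc.2.1 + PySem.List.pyGetD ball 3 0,
   if PySem.Int.mod d 2 != dd then false else acc.2.2)

-- A's pass-2 loop body over new_dict.items().
def aGroupOut (new_balls : List (List Int)) (divided : List (List Int))
    (kv : (Int × Int) × List Int) : List (List Int) :=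
  let val := kv.2
  if val.length == 1 then
    divided ++ [PySem.List.pyGetD new_balls (PySem.List.pyGetD val 0 0) []]
  else
    let nr := kv.1.1
    let nc := kv.1.2
    let dd := PySem.Int.mod
      (PySem.List.pyGetD (PySem.List.pyGetD new_balls (PySem.List.pyGetD val 0 0) []) (-1) 0) 2
    let msf := val.foldl (aAccStep new_balls dd) (0, 0, true)
    let m := PySem.Int.floordiv msf.1 5
    let s := PySem.Int.floordiv msf.2.1 (val.length : Int)
    if m == 0 then divided
    else if msf.2.2 then
      (PySem.List.pyRange 0 8 2).foldl (fun dv j => dv ++ [[nr, nc, m, s, j]]) divided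
    else
      (PySem.List.pyRange 1 9 2).foldl (fun dv j => dv ++ [[nr, nc, m, s, j]]) divided

def divide_balls (new_balls : List (List Int)) : List (List Int) :=
  ((PySem.List.enumerate new_balls 0).foldl aInsert PySem.Dict.empty).items.foldl
    (aGroupOut new_balls) []

-- ===== PORT B =====
-- B's per-group accumulator update: (first, extra, m, s, same) + one more ball.
def bAccStep (g : List Int × Int × Int × Int × Bool) (ball : List Int) :
    List Int × Int × Int × Int × Bool :=
  (g.1, g.2.1 + 1,
   g.2.2.1 + PySem.List.pyGetD ball 2 0,
   g.2.2.2.1 + PySem.List.pyGetD ball 3 0,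
   g.2.2.2.2 && (PySem.Int.mod (PySem.List.pyGetD ball (-1) 0) 2 ==
                 PySem.Int.mod (PySem.List.pyGetD g.1 (-1) 0) 2))

-- B's pass-1 loop body.
def bStep (gs : PySem.Dict (Int × Int) (List Int × Int × Int × Int × Bool))
    (ball : List Int) : PySem.Dict (Int × Int) (List Int × Int × Int × Int × Bool) :=
  let key := (PySem.List.pyGetD ball 0 0, PySem.List.pyGetD ball 1 0)
  match gs.get? key with
  | none   => gs.insert key (ball, 0, 0, 0, true)
  | some g => gs.insert key (bAccStep g ball)

-- B's pass-2 loop body over groups.items().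
def bGroupOut (result : List (List Int))
    (kv : (Int × Int) × (List Int × Int × Int × Int × Bool)) : List (List Int) :=
  let first := kv.2.1
  let extra := kv.2.2.1
  if extra == 0 then result ++ [first]
  else
    let m := PySem.Int.floordiv (kv.2.2.2.1 + PySem.List.pyGetD first 2 0) 5
    let s := PySem.Int.floordiv (kv.2.2.2.2.1 + PySem.List.pyGetD first 3 0) (extra + 1)
    if m == 0 then result
    else
      let start : Int := if kv.2.2.2.2.2 then 0 else 1
      (PySem.List.pyRange start (start + 8) 2).foldl
        (fun res j => res ++ [[kv.1.1, kv.1.2, m, s, j]]) result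

def divide_balls_alt (new_balls : List (List Int)) : List (List Int) :=
  (new_balls.foldl bStep PySem.Dict.empty).items.foldl bGroupOut []

-- ===== PRECONDITION & SPEC =====
-- Pre_ excludes exactly the inputs where Python A raises (IndexError): a ball with
-- fewer than 2 entries, or a ball sharing its (r, c) position with another ball
-- while having fewer than 4 entries.
def Pre_divide_balls (new_balls : List (List Int)) : Prop :=
  ∀ b ∈ new_balls, 2 ≤ b.length ∧
    (2 ≤ new_balls.countP (fun b' => b'.take 2 == b.take 2) → 4 ≤ b.length)
instance (new_balls : List (List Int)) : Decidable (Pre_divide_balls new_balls) := by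
  unfold Pre_divide_balls; infer_instance

def pvWitness_divide_balls : List (List Int) :=
  [[0, 0, 10, 2, 0], [0, 0, 7, 4, 2], [1, 2, 9, 9]]

def Spec_divide_balls (new_balls : List (List Int)) (out : List (List Int)) : Prop := out = divide_balls_alt new_balls
instance (new_balls : List (List Int)) (out : List (List Int)) : Decidable (Spec_divide_balls new_balls out) := by unfold Spec_divide_balls; infer_instance

-- ===== CLAIM (what is proved, stated in full; the proofs are below) =====
def Claim_equal_divide_balls : Prop := ∀ (new_balls : List (List Int)), Dom_divide_balls new_balls → Pre_divide_balls new_balls → Spec_divide_balls new_balls (divide_balls new_balls)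

-- ===== LEMMAS AND PROOFS =====

-- ball referenced by a stored index
def deref (balls : List (List Int)) (i : Int) : List Int := PySem.List.pyGetD balls i []

def g2 (b : List Int) : Int := PySem.List.pyGetD b 2 0
def g3 (b : List Int) : Int := PySem.List.pyGetD b 3 0
def gpar (b : List Int) : Int := PySem.Int.mod (PySem.List.pyGetD b (-1) 0) 2

-- B's aggregate over the (non-empty) list of balls of one group
def bAgg (bs : List (List Int)) : List Int × Int × Int × Int × Bool :=
  match bs with
  | [] => ([], 0, 0, 0, true)
  | b :: rest => rest.foldl bAccStep (b, 0, 0, 0, true)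

def mapB (balls : List (List Int)) (kv : (Int × Int) × List Int) :
    (Int × Int) × (List Int × Int × Int × Int × Bool) :=
  (kv.1, bAgg (kv.2.map (deref balls)))

lemma get?_mk_map {ν ν' : Type} (l : List ((Int × Int) × ν)) (g : ν → ν') (k : Int × Int) :
    (PySem.Dict.mk (l.map (fun kv => (kv.1, g kv.2)))).get? k =
      ((PySem.Dict.mk l).get? k).map g := by
  induction l with
  | nil => rfl
  | cons p rest ih =>
      obtain ⟨pk, pv⟩ := p
      simp only [List.map_cons, PySem.Dict.get?_mk_cons]
      by_cases h : pk == k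
      · simp [h]
      · simp [h, ih]

lemma bAgg_append (b x : List Int) (bs : List (List Int)) :
    bAgg ((b :: bs) ++ [x]) = bAccStep (bAgg (b :: bs)) x := by
  simp [bAgg, List.foldl_append]

lemma bfold_char (first : List Int) (bs : List (List Int)) (e m s : Int) (fl : Bool) :
    bs.foldl bAccStep (first, e, m, s, fl) =
      (first, e + bs.length, m + (bs.map g2).sum, s + (bs.map g3).sum,
       fl && bs.all (fun x => gpar x == gpar first)) := by
  induction bs generalizing e m s fl with
  | nil => simp
  | cons x rest ih =>
      simp only [List.foldl_cons, bAccStep, List.map_cons, List.sum_cons, List.all_cons,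
        List.length_cons, ih, g2, g3, gpar]
      refine Prod.ext rfl (Prod.ext ?_ (Prod.ext ?_ (Prod.ext ?_ ?_))) <;> simp
      · ring
      · ring
      · ring
      · rw [Bool.and_assoc]

lemma afold_char (balls : List (List Int)) (dd : Int) (is : List Int) (m s : Int) (fl : Bool) :
    is.foldl (aAccStep balls dd) (m, s, fl) =
      (m + (is.map (fun i => g2 (deref balls i))).sum,
       s + (is.map (fun i => g3 (deref balls i))).sum,
       fl && is.all (fun i => gpar (deref balls i) == dd)) := by
  induction is generalizing m s fl with
  | nil => simp
  | cons i rest ih =>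
      simp only [List.foldl_cons, aAccStep, List.map_cons, List.sum_cons, List.all_cons, ih,
        g2, g3, gpar, deref]
      refine Prod.ext ?_ (Prod.ext ?_ ?_) <;> simp
      · ring
      · ring
      · cases fl <;> simp [← Bool.beq_eq_decide_eq]

-- pass-1 invariant: B's dict is A's dict with each index list replaced by its aggregate
lemma pass1 (balls : List (List Int)) (l : List (Int × List Int))
    (dA : PySem.Dict (Int × Int) (List Int))
    (dB : PySem.Dict (Int × Int) (List Int × Int × Int × Int × Bool))
    (hlink : ∀ p ∈ l, deref balls p.1 = p.2)
    (hnd : dA.keys.Nodup)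
    (hne : ∀ kv ∈ dA.items, kv.2 ≠ [])
    (hmap : dB.items = dA.items.map (mapB balls)) :
    (l.foldl aInsert dA).keys.Nodup ∧
    (∀ kv ∈ (l.foldl aInsert dA).items, kv.2 ≠ []) ∧
    ((l.map Prod.snd).foldl bStep dB).items = (l.foldl aInsert dA).items.map (mapB balls) := by
  induction l generalizing dA dB with
  | nil => exact ⟨hnd, hne, hmap⟩
  | cons p rest ih =>
      obtain ⟨i, b⟩ := p
      have hib : deref balls i = b := hlink (i, b) (List.mem_cons_self)
      simp only [List.map_cons, List.foldl_cons]
      have hget : dB.get? (PySem.List.pyGetD b 0 0, PySem.List.pyGetD b 1 0) =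
          (dA.get? (PySem.List.pyGetD b 0 0, PySem.List.pyGetD b 1 0)).map
            (fun idxs => bAgg (idxs.map (deref balls))) := by
        obtain ⟨itemsB⟩ := dB
        have hmb : itemsB = dA.items.map (fun kv => (kv.1, bAgg (kv.2.map (deref balls)))) := hmap
        rw [hmb]
        exact get?_mk_map dA.items (fun idxs => bAgg (idxs.map (deref balls))) _
      set k : Int × Int := (PySem.List.pyGetD b 0 0, PySem.List.pyGetD b 1 0) with hk
      cases hA : dA.get? k with
      | none =>
          have hcA : dA.contains k = false := by
            rw [PySem.Dict.contains_eq_isSome_get?, hA]; rfl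
          have hcB : dB.contains k = false := by
            rw [PySem.Dict.contains_eq_isSome_get?, hget, hA]; rfl
          have hstepA : aInsert dA (i, b) = dA.insert k [i] := by
            simp only [aInsert, ← hk, hA]
          have hstepB : bStep dB b = dB.insert k (b, 0, 0, 0, true) := by
            simp only [bStep, ← hk, hget, hA, Option.map_none]
          rw [hstepA, hstepB]
          refine ih (dA.insert k [i]) (dB.insert k (b, 0, 0, 0, true))
            (fun q hq => hlink q (List.mem_cons_of_mem _ hq))
            (PySem.Dict.nodup_keys_insert dA k [i] hnd) ?_ ?_
          · intro kv hkv
            rw [PySem.Dict.items_insert_of_not_contains dA [i] hcA, List.mem_append] at hkv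
            rcases hkv with hkv | hkv
            · exact hne kv hkv
            · simp only [List.mem_singleton] at hkv
              subst hkv; simp
          · rw [PySem.Dict.items_insert_of_not_contains dA [i] hcA,
              PySem.Dict.items_insert_of_not_contains dB (b, 0, 0, 0, true) hcB,
              List.map_append, hmap]
            simp [mapB, bAgg, hib]
      | some idxs =>
          have hmem : (k, idxs) ∈ dA.items := PySem.Dict.mem_items_of_get?_eq_some dA hA
          have hnei : idxs ≠ [] := hne (k, idxs) hmem
          have hcA : dA.contains k = true := by
            rw [PySem.Dict.contains_eq_isSome_get?, hA]; rfl
          have hcB : dB.contains k = true := by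
            rw [PySem.Dict.contains_eq_isSome_get?, hget, hA]; rfl
          have hstepA : aInsert dA (i, b) = dA.insert k (idxs ++ [i]) := by
            simp only [aInsert, ← hk, hA]
          have hstepB : bStep dB b = dB.insert k (bAccStep (bAgg (idxs.map (deref balls))) b) := by
            simp only [bStep, ← hk, hget, hA, Option.map_some]
          rw [hstepA, hstepB]
          refine ih (dA.insert k (idxs ++ [i])) _
            (fun q hq => hlink q (List.mem_cons_of_mem _ hq))
            (PySem.Dict.nodup_keys_insert dA k (idxs ++ [i]) hnd) ?_ ?_
          · intro kv hkv
            rw [PySem.Dict.items_insert_of_contains dA (idxs ++ [i]) hcA, List.mem_map] at hkv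
            obtain ⟨q, hq, hqe⟩ := hkv
            by_cases hqk : (q.1 == k) = true
            · rw [if_pos hqk] at hqe; subst hqe; simp
            · rw [if_neg hqk] at hqe; subst hqe; exact hne q hq
          · rw [PySem.Dict.items_insert_of_contains dA (idxs ++ [i]) hcA,
              PySem.Dict.items_insert_of_contains dB (bAccStep (bAgg (idxs.map (deref balls))) b) hcB,
              hmap, List.map_map, List.map_map]
            refine List.map_congr_left (fun q hq => ?_)
            simp only [Function.comp_apply]
            have hfst : (mapB balls q).1 = q.1 := rfl
            by_cases hqk : (q.1 == k) = true
            · have hq1 : q.1 = k := eq_of_beq hqk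
              have hqv : q.2 = idxs := by
                have := PySem.Dict.get?_of_mem_items dA
                  (show (q.1, q.2) ∈ dA.items by simpa using hq) hnd
                rw [hq1, hA] at this
                exact (Option.some_injective _ this.symm)
              rw [if_pos (hfst ▸ hqk), if_pos hqk]
              show (k, bAccStep (bAgg (idxs.map (deref balls))) b) =
                mapB balls (k, idxs ++ [i])
              obtain ⟨j, t, hjt⟩ := List.exists_cons_of_ne_nil hnei
              subst hjt
              show _ = (k, bAgg (((j :: t) ++ [i]).map (deref balls)))
              simp only [List.map_append, List.map_cons, List.map_nil, hib]
              rw [bAgg_append]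
            · rw [if_neg (fun hc => hqk (hfst ▸ hc)), if_neg hqk]

lemma mem_enumerate_spec {α : Type} (xs : List α) (s : Int) (p : Int × α)
    (hp : p ∈ PySem.List.enumerate xs s) : ∃ n : Nat, p.1 = s + n ∧ xs[n]? = some p.2 := by
  induction xs generalizing s with
  | nil => simp [PySem.List.enumerate] at hp
  | cons x xs ih =>
      rw [PySem.List.enumerate_cons, List.mem_cons] at hp
      rcases hp with hp | hp
      · exact ⟨0, by simp [hp]⟩
      · obtain ⟨n, h1, h2⟩ := ih (s + 1) hp
        exact ⟨n + 1, by push_cast; omega, by simpa using h2⟩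

lemma out_eq (balls : List (List Int)) (acc : List (List Int))
    (kv : (Int × Int) × List Int) (h : kv.2 ≠ []) :
    bGroupOut acc (mapB balls kv) = aGroupOut balls acc kv := by
  obtain ⟨k, val⟩ := kv
  obtain ⟨i0, tl, rfl⟩ := List.exists_cons_of_ne_nil h
  cases tl with
  | nil =>
      simp [aGroupOut, bGroupOut, mapB, bAgg, deref, PySem.List.pyGetD_zero_cons]
  | cons t ts =>
      simp only [aGroupOut, bGroupOut, mapB, List.map_cons, bAgg, bfold_char, afold_char,
        PySem.List.pyGetD_zero_cons, List.length_cons, List.map_map]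
      have hdd : PySem.Int.mod (PySem.List.pyGetD (PySem.List.pyGetD balls i0 []) (-1) 0) 2
          = gpar (deref balls i0) := rfl
      rw [hdd]
      have hflagA : (true && ((i0 :: t :: ts).all fun i => gpar (deref balls i) == gpar (deref balls i0)))
          = ((t :: ts).all fun i => gpar (deref balls i) == gpar (deref balls i0)) := by
        simp [List.all_cons]
      have hflagB : (true && ((deref balls t :: List.map (deref balls) ts).all fun x => gpar x == gpar (deref balls i0)))
          = ((t :: ts).all fun i => gpar (deref balls i) == gpar (deref balls i0)) := by
        simp [List.all_map, Function.comp_def]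
      have hm : (0 + (g2 (deref balls t) :: List.map (g2 ∘ deref balls) ts).sum +
          PySem.List.pyGetD (deref balls i0) 2 0) =
          (0 + (g2 (deref balls i0) :: g2 (deref balls t) :: List.map (fun i => g2 (deref balls i)) ts).sum) := by
        simp only [List.sum_cons, Function.comp_def, g2, deref]; ring
      have hs : (0 + (g3 (deref balls t) :: List.map (g3 ∘ deref balls) ts).sum +
          PySem.List.pyGetD (deref balls i0) 3 0) =
          (0 + (g3 (deref balls i0) :: g3 (deref balls t) :: List.map (fun i => g3 (deref balls i)) ts).sum) := by
        simp only [List.sum_cons, Function.comp_def, g3, deref]; ring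
      have hden : (0 + ((List.map (deref balls) ts).length + 1 : Nat) + 1 : Int)
          = ((ts.length + 1 + 1 : Nat) : Int) := by
        simp only [List.length_map]; push_cast; ring
      rw [hflagA, hflagB, hm, hs, hden]
      have hc1 : ((0 : Int) + ((List.map (deref balls) ts).length + 1 : Nat) == 0) = false := by
        simp only [List.length_map]; push_cast; simp; omega
      have hc2 : ((ts.length + 1 + 1 : Nat) == 1) = false := by simp
      rw [hc1, hc2]
      simp only [Bool.false_eq_true, if_false]
      by_cases hF : ((t :: ts).all fun i => gpar (deref balls i) == gpar (deref balls i0)) = true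
      · rw [hF]
        norm_num
      · rw [Bool.not_eq_true] at hF
        rw [hF]
        norm_num

-- ===== VERDICT (by name: the statement is the Claim_ definition above) =====
theorem divide_balls_spec : Claim_equal_divide_balls := by
  intro new_balls _ _
  unfold Spec_divide_balls divide_balls divide_balls_alt
  have h := pass1 new_balls (PySem.List.enumerate new_balls 0)
      PySem.Dict.empty PySem.Dict.empty
      (by intro p hp
          obtain ⟨n, h1, h2⟩ := mem_enumerate_spec new_balls 0 p hp
          simp [deref, h1, PySem.List.pyGetD_natCast, List.getD, h2])
      (by simp [PySem.Dict.empty, PySem.Dict.keys]) (by simp [PySem.Dict.empty]) (by simp [PySem.Dict.empty])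
  obtain ⟨-, hne, hmap⟩ := h
  rw [PySem.List.map_snd_enumerate] at hmap
  rw [hmap, List.foldl_map]
  exact (PySem.List.foldl_congr_mem _ _ _ _ (fun acc kv hkv => out_eq _ acc kv (hne kv hkv))).symm
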